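-- pv_equiv track=rewrite | github.com/x-devease/devease-ad-agents-offline | src/meta/ad/generator/pipeline/feature_reproduction.py | _check_feature_in_prompt
-- ===== SOURCE A (Python) =====
-- def _check_feature_in_prompt(
--
--     feature_name: str,
--     expected_value: str,
--     prompt_text: str,
-- ) -> tuple:
--     """
--     Check if a feature appears in the prompt.
--     Returns (is_present, mention_text)
--     """
--     prompt_lower = prompt_text.lower()
--     feature_lower = feature_name.lower().replace("_", " ")
--     value_lower = expected_value.lower()
--     # Check for feature name
--     if feature_lower in prompt_lower:
--         # Find the sentence containing the feature
--         sentences = prompt_text.split(".")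
--         for sent in sentences:
--             if feature_lower in sent.lower():
--                 return True, sent.strip()
--     # Check for value
--     if value_lower in prompt_lower:
--         sentences = prompt_text.split(".")
--         for sent in sentences:
--             if value_lower in sent.lower():
--                 return True, sent.strip()
--     # Check for semantic equivalents
--     equivalents = {
--         "warm-dominant": ["warm", "warm tones", "warm glow", "inviting"],
--         "partial": ["partially visible", "partial view", "partially"],
--         "dominant": ["prominently", "prominent", "dominant", "stands out"],
--         "generous": ["generous space", "ample space", "breathing room"],
--         "balanced": ["balanced", "harmonious", "even distribution"],
--         "lifestyle context": ["lifestyle", "person using", "in use"],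
--     }
--     for equiv_key, equiv_values in equivalents.items():
--         if equiv_key not in value_lower:
--             continue
--         for equiv in equiv_values:
--             if equiv not in prompt_lower:
--                 continue
--             sentences = prompt_text.split(".")
--             for sent in sentences:
--                 if equiv in sent.lower():
--                     return True, sent.strip()
--     return False, None
-- ===== SOURCE B (Python) =====
-- def _check_feature_in_prompt(
--     feature_name: str,
--     expected_value: str,
--     prompt_text: str,
-- ) -> tuple:
--     """
--     Check if a feature appears in the prompt.
--     Returns (is_present, mention_text)
--     """
--     prompt_lower = prompt_text.lower()
--     value_lower = expected_value.lower()
--     equivalents = {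
--         "warm-dominant": ["warm", "warm tones", "warm glow", "inviting"],
--         "partial": ["partially visible", "partial view", "partially"],
--         "dominant": ["prominently", "prominent", "dominant", "stands out"],
--         "generous": ["generous space", "ample space", "breathing room"],
--         "balanced": ["balanced", "harmonious", "even distribution"],
--         "lifestyle context": ["lifestyle", "person using", "in use"],
--     }
--     terms = [feature_name.lower().replace("_", " "), value_lower]
--     for key, vals in equivalents.items():
--         if key in value_lower:
--             terms.extend(vals)
--     # only terms that occur somewhere in the whole prompt can ever match a sentence
--     live = [t for t in terms if t in prompt_lower]
--     # single sentence-major pass: keep the (lowest-rank, earliest) matching sentence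
--     best_rank = len(live)
--     best_sent = None
--     for sent in prompt_text.split("."):
--         sent_lower = sent.lower()
--         for rank, term in enumerate(live):
--             if rank >= best_rank:
--                 break
--             if term in sent_lower:
--                 best_rank = rank
--                 best_sent = sent.strip()
--                 break
--     if best_sent is None:
--         return False, None
--     return True, best_sent
-- ===== Notes on version B (the rewrite author's own statement) =====
-- stated objective: alternative
-- what changed: Inverts the loop nesting: instead of A's term-major guard-then-rescan blocks (for each candidate term, re-split and rescan all sentences), B filters the candidate terms to those occurring in the prompt and makes ONE sentence-major pass, keeping an argmin accumulator (best term rank, earliest such sentence); correctness rests on the proved loop-interchange: the first term with a hit and its first hitting sentence equal the minimal rank seen sentence-by-sentence.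
import Mathlib
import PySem

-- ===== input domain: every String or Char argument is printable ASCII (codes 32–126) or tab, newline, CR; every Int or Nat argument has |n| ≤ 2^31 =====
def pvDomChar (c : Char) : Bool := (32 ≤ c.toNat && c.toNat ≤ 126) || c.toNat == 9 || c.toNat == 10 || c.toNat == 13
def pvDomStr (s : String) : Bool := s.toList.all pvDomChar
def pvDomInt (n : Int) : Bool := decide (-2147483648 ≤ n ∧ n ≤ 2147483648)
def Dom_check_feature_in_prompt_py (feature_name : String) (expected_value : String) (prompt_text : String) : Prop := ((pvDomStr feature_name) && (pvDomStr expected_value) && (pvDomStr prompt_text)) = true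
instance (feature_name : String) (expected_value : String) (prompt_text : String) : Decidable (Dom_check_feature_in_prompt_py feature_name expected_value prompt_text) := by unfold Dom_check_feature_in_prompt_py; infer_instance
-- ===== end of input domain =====

-- B inverts A's loop nesting: one sentence-major pass with an argmin (rank, sentence)
-- accumulator over prompt-filtered candidate terms, instead of A's per-term sentence rescans
-- (objective: alternative algorithm, same cost class).


-- the `equivalents` dict literal (string keys are distinct, so an association list is exact)
def pvEquivalents : List (String × List String) :=
  [("warm-dominant", ["warm", "warm tones", "warm glow", "inviting"]),
   ("partial", ["partially visible", "partial view", "partially"]),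
   ("dominant", ["prominently", "prominent", "dominant", "stands out"]),
   ("generous", ["generous space", "ample space", "breathing room"]),
   ("balanced", ["balanced", "harmonious", "even distribution"]),
   ("lifestyle context", ["lifestyle", "person using", "in use"])]

-- ===== PORT A =====
-- 'sentences = prompt_text.split("."); for sent in sentences: if term in sent.lower(): return True, sent.strip()'
-- (split? is some because the separator "." is nonempty)
def pvScanA (term : String) (prompt_text : String) : Option String :=
  (((PySem.Str.split? prompt_text ".").getD []).find?
      (fun sent => PySem.Str.isIn term (PySem.Str.lower sent))).map PySem.Str.strip

-- the inner 'for equiv in equiv_values' loop of A's equivalents block (guarded scan per term)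
def pvInnerA (prompt_lower prompt_text : String) : List String → Option String
  | [] => none
  | e :: rest =>
    if PySem.Str.isIn e prompt_lower then
      match pvScanA e prompt_text with
      | some s => some s
      | none => pvInnerA prompt_lower prompt_text rest
    else pvInnerA prompt_lower prompt_text rest

-- the outer 'for equiv_key, equiv_values in equivalents.items()' loop of A
def pvEquivA (value_lower prompt_lower prompt_text : String) : List (String × List String) → Option String
  | [] => none
  | (k, vs) :: rest =>
    if PySem.Str.isIn k value_lower then
      match pvInnerA prompt_lower prompt_text vs with
      | some s => some s
      | none => pvEquivA value_lower prompt_lower prompt_text rest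
    else pvEquivA value_lower prompt_lower prompt_text rest

def check_feature_in_prompt_py (feature_name : String) (expected_value : String) (prompt_text : String) : Bool × Option String :=
  let prompt_lower := PySem.Str.lower prompt_text
  let feature_lower := PySem.Str.replace (PySem.Str.lower feature_name) "_" " "
  let value_lower := PySem.Str.lower expected_value
  match (if PySem.Str.isIn feature_lower prompt_lower then pvScanA feature_lower prompt_text else none) with
  | some s => (true, some s)
  | none =>
    match (if PySem.Str.isIn value_lower prompt_lower then pvScanA value_lower prompt_text else none) with
    | some s => (true, some s)
    | none =>
      match pvEquivA value_lower prompt_lower prompt_text pvEquivalents with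
      | some s => (true, some s)
      | none => (false, none)

-- ===== PORT B =====
-- 'for rank, term in enumerate(live): if rank >= best_rank: break; if term in sent_lower: …'
-- returns the first rank (< best) of a term contained in the lowered sentence
def pvFirstRank (sent_lower : String) (best : Nat) : List String → Nat → Option Nat
  | [], _ => none
  | t :: ts, r =>
    if best ≤ r then none
    else if PySem.Str.isIn t sent_lower then some r
    else pvFirstRank sent_lower best ts (r + 1)

-- 'for sent in prompt_text.split("."): …' with the (best_rank, best_sent) accumulator
def pvSMLoop (live : List String) : List String → Nat × Option String → Nat × Option String
  | [], st => st
  | sent :: ss, (best, bs) =>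
    match pvFirstRank (PySem.Str.lower sent) best live 0 with
    | some r => pvSMLoop live ss (r, some (PySem.Str.strip sent))
    | none => pvSMLoop live ss (best, bs)

def check_feature_in_prompt_py_alt (feature_name : String) (expected_value : String) (prompt_text : String) : Bool × Option String :=
  let prompt_lower := PySem.Str.lower prompt_text
  let value_lower := PySem.Str.lower expected_value
  let terms := [PySem.Str.replace (PySem.Str.lower feature_name) "_" " ", value_lower] ++
    pvEquivalents.foldl
      (fun acc kv => if PySem.Str.isIn kv.1 value_lower then acc ++ kv.2 else acc) []
  let live := terms.filter (fun t => PySem.Str.isIn t prompt_lower)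
  let sentences := (PySem.Str.split? prompt_text ".").getD []
  match pvSMLoop live sentences (live.length, none) with
  | (_, some s) => (true, some s)
  | (_, none) => (false, none)

-- ===== PRECONDITION & SPEC =====
def Spec_check_feature_in_prompt_py (feature_name : String) (expected_value : String) (prompt_text : String) (out : Bool × Option String) : Prop := out = check_feature_in_prompt_py_alt feature_name expected_value prompt_text
instance (feature_name : String) (expected_value : String) (prompt_text : String) (out : Bool × Option String) : Decidable (Spec_check_feature_in_prompt_py feature_name expected_value prompt_text out) := by unfold Spec_check_feature_in_prompt_py; infer_instance

-- ===== CLAIM (what is proved, stated in full; the proofs are below) =====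
def Claim_equal_check_feature_in_prompt_py : Prop := ∀ (feature_name : String) (expected_value : String) (prompt_text : String), Dom_check_feature_in_prompt_py feature_name expected_value prompt_text → Spec_check_feature_in_prompt_py feature_name expected_value prompt_text (check_feature_in_prompt_py feature_name expected_value prompt_text)

-- ===== LEMMAS AND PROOFS =====

-- unguarded term-major scan (A's blocks with the 'in prompt_lower' guard filtered away)
def pvTM (prompt_text : String) : List String → Option String
  | [] => none
  | t :: ts =>
    match pvScanA t prompt_text with
    | some s => some s
    | none => pvTM prompt_text ts

-- bounded, rank-carrying term-major scan over a fixed sentence list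
def pvTMB (ss : List String) : List String → Nat → Nat → Option (Nat × String)
  | [], _, _ => none
  | t :: ts, r, b =>
    if b ≤ r then none
    else
      match ss.find? (fun sent => PySem.Str.isIn t (PySem.Str.lower sent)) with
      | some s => some (r, PySem.Str.strip s)
      | none => pvTMB ss ts (r + 1) b

theorem pvInnerA_append (pl pt : String) (ts us : List String) :
    pvInnerA pl pt (ts ++ us)
      = match pvInnerA pl pt ts with
        | some s => some s
        | none => pvInnerA pl pt us := by
  induction ts with
  | nil => rfl
  | cons t ts ih =>
    by_cases hg : PySem.Chars.isIn t.toList pl.toList = true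
    · cases hs : pvScanA t pt with
      | none => simp [pvInnerA, hg, hs, ih]
      | some s => simp [pvInnerA, hg, hs]
    · simp only [Bool.not_eq_true] at hg
      simp [pvInnerA, hg, ih]

-- B's foldl-built equivalents terms, scanned after `acc`, = A's outer equivalents loop
theorem pvInnerA_foldl (value_lower pl pt : String)
    (l : List (String × List String)) (acc : List String) :
    pvInnerA pl pt
        (l.foldl (fun acc kv => if PySem.Str.isIn kv.1 value_lower then acc ++ kv.2 else acc) acc)
      = match pvInnerA pl pt acc with
        | some s => some s
        | none => pvEquivA value_lower pl pt l := by
  induction l generalizing acc with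
  | nil =>
    simp only [List.foldl_nil, pvEquivA]
    cases pvInnerA pl pt acc <;> rfl
  | cons kv rest ih =>
    obtain ⟨k, vs⟩ := kv
    by_cases hg : PySem.Chars.isIn k.toList value_lower.toList = true
    · have hg' : PySem.Str.isIn k value_lower = true := hg
      simp only [List.foldl_cons, pvEquivA, hg', if_true]
      rw [ih (acc ++ vs), pvInnerA_append]
      cases pvInnerA pl pt acc <;> cases pvInnerA pl pt vs <;> rfl
    · simp only [Bool.not_eq_true] at hg
      have hg' : PySem.Str.isIn k value_lower = false := hg
      simp only [List.foldl_cons, pvEquivA, hg', Bool.false_eq_true, if_false]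
      exact ih acc

-- filtering the guard out: guarded term-major = unguarded term-major on the filtered list
theorem pvInnerA_filter (pl pt : String) (ts : List String) :
    pvInnerA pl pt ts = pvTM pt (ts.filter (fun t => PySem.Str.isIn t pl)) := by
  induction ts with
  | nil => rfl
  | cons t ts ih =>
    by_cases hg : PySem.Chars.isIn t.toList pl.toList = true
    · simp [pvInnerA, pvTM, hg, ih]
    · simp only [Bool.not_eq_true] at hg
      simp [pvInnerA, hg, ih]

theorem pvTMB_nil (ts : List String) (r b : Nat) : pvTMB [] ts r b = none := by
  induction ts generalizing r with
  | nil => rfl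
  | cons t ts ih => simp [pvTMB, ih]

-- ranks returned by pvFirstRank starting at r are at least r
theorem pvFirstRank_ge (sl : String) (b : Nat) (ts : List String) (r k : Nat)
    (h : pvFirstRank sl b ts r = some k) : r ≤ k := by
  induction ts generalizing r with
  | nil => simp [pvFirstRank] at h
  | cons t ts ih =>
    by_cases h1 : b ≤ r
    · simp [pvFirstRank, h1] at h
    · by_cases h2 : PySem.Chars.isIn t.toList sl.toList = true
      · simp [pvFirstRank, h1, h2] at h
        omega
      · simp only [Bool.not_eq_true] at h2
        simp [pvFirstRank, h1, h2] at h
        have := ih (r + 1) h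
        omega

-- with enough slack in the bound, the bounded scan is the unguarded term-major scan
theorem pvTMB_slack (pt : String) (ts : List String) (r b : Nat) (h : r + ts.length ≤ b) :
    (pvTMB ((PySem.Str.split? pt ".").getD []) ts r b).map Prod.snd = pvTM pt ts := by
  induction ts generalizing r with
  | nil => rfl
  | cons t ts ih =>
    have hrb : ¬ b ≤ r := by simp [List.length_cons] at h; omega
    simp only [pvTMB, pvTM, pvScanA, hrb, if_false]
    cases hf : ((PySem.Str.split? pt ".").getD []).find?
        (fun sent => PySem.Str.isIn t (PySem.Str.lower sent)) with
    | some s => simp [hf]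
    | none =>
      simp only [hf, Option.map_none]
      exact ih (r + 1) (by simp [List.length_cons] at h; omega)

-- loop-interchange merge step: consuming one sentence on the sentence-major side
theorem pvTMB_cons (s : String) (ss : List String) (ts : List String) (r b : Nat) :
    pvTMB (s :: ss) ts r b
      = match pvFirstRank (PySem.Str.lower s) b ts r with
        | some k =>
          match pvTMB ss ts r k with
          | some p => some p
          | none => some (k, PySem.Str.strip s)
        | none => pvTMB ss ts r b := by
  induction ts generalizing r with
  | nil => simp [pvTMB, pvFirstRank]
  | cons t ts ih =>
    by_cases hrb : b ≤ r
    · simp [pvTMB, pvFirstRank, hrb]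
    · by_cases hhit : PySem.Chars.isIn t.toList (PySem.Chars.lower s.toList) = true
      · have hz : pvTMB ss (t :: ts) r r = none := by simp [pvTMB]
        simp [pvTMB, pvFirstRank, hrb, hhit, hz]
      · simp only [Bool.not_eq_true] at hhit
        cases hfr : pvFirstRank (PySem.Str.lower s) b ts (r + 1) with
        | some k =>
          have hrk : r + 1 ≤ k := pvFirstRank_ge _ _ _ _ _ hfr
          have hkr : ¬ k ≤ r := by omega
          cases hfind : ss.find? (fun sent => PySem.Chars.isIn t.toList (PySem.Chars.lower sent.toList)) with
          | some s2 =>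
            simp [pvTMB, pvFirstRank, hrb, hhit, hfind, hfr, hkr]
          | none =>
            rw [show pvTMB (s :: ss) (t :: ts) r b = pvTMB (s :: ss) ts (r + 1) b from by
              simp [pvTMB, hrb, hhit, hfind]]
            rw [ih (r + 1)]
            simp [pvTMB, pvFirstRank, hrb, hhit, hfr, hkr, hfind]
        | none =>
          cases hfind : ss.find? (fun sent => PySem.Chars.isIn t.toList (PySem.Chars.lower sent.toList)) with
          | some s2 =>
            simp [pvTMB, pvFirstRank, hrb, hhit, hfind, hfr]
          | none =>
            rw [show pvTMB (s :: ss) (t :: ts) r b = pvTMB (s :: ss) ts (r + 1) b from by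
              simp [pvTMB, hrb, hhit, hfind]]
            rw [ih (r + 1)]
            simp [pvTMB, pvFirstRank, hrb, hhit, hfr, hfind]

-- the sentence-major fold computes the bounded term-major scan (argmin invariant)
theorem pvSMLoop_eq_pvTMB (live : List String) (ss : List String) (best : Nat) (bs : Option String) :
    pvSMLoop live ss (best, bs)
      = match pvTMB ss live 0 best with
        | some (r, s) => (r, some s)
        | none => (best, bs) := by
  induction ss generalizing best bs with
  | nil => simp [pvSMLoop, pvTMB_nil]
  | cons sent ss ih =>
    rw [show pvSMLoop live (sent :: ss) (best, bs)
        = (match pvFirstRank (PySem.Str.lower sent) best live 0 with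
           | some r => pvSMLoop live ss (r, some (PySem.Str.strip sent))
           | none => pvSMLoop live ss (best, bs)) from rfl,
      pvTMB_cons]
    cases hfr : pvFirstRank (PySem.Str.lower sent) best live 0 with
    | some k =>
      dsimp only
      rw [ih]
      cases htmb : pvTMB ss live 0 k with
      | some p => obtain ⟨a, c⟩ := p; simp
      | none => simp
    | none =>
      dsimp only
      exact ih best bs

-- A's guarded block chain = the guarded term-major scan over the full ordered term list
theorem pvA_chain (fl vl pt : String) :
    pvInnerA (PySem.Str.lower pt) pt
        ([fl, vl] ++ pvEquivalents.foldl
          (fun acc (kv : String × List String) => if PySem.Str.isIn kv.1 vl then acc ++ kv.2 else acc) [])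
      = match (if PySem.Str.isIn fl (PySem.Str.lower pt) then pvScanA fl pt else none) with
        | some s => some s
        | none =>
          match (if PySem.Str.isIn vl (PySem.Str.lower pt) then pvScanA vl pt else none) with
          | some s => some s
          | none => pvEquivA vl (PySem.Str.lower pt) pt pvEquivalents := by
  rw [show ([fl, vl] : List String) ++ pvEquivalents.foldl
        (fun acc (kv : String × List String) => if PySem.Str.isIn kv.1 vl then acc ++ kv.2 else acc) []
      = [fl] ++ ([vl] ++ pvEquivalents.foldl
        (fun acc (kv : String × List String) => if PySem.Str.isIn kv.1 vl then acc ++ kv.2 else acc) []) from rfl,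
    pvInnerA_append, pvInnerA_append, pvInnerA_foldl]
  by_cases h1 : PySem.Chars.isIn fl.toList (PySem.Chars.lower pt.toList) = true
  · cases hs1 : pvScanA fl pt with
    | some s => simp [pvInnerA, h1, hs1]
    | none =>
      by_cases h2 : PySem.Chars.isIn vl.toList (PySem.Chars.lower pt.toList) = true
      · cases hs2 : pvScanA vl pt with
        | some s => simp [pvInnerA, h1, hs1, h2, hs2]
        | none => simp [pvInnerA, h1, hs1, h2, hs2]
      · simp only [Bool.not_eq_true] at h2
        simp [pvInnerA, h1, hs1, h2]
  · simp only [Bool.not_eq_true] at h1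
    by_cases h2 : PySem.Chars.isIn vl.toList (PySem.Chars.lower pt.toList) = true
    · cases hs2 : pvScanA vl pt with
      | some s => simp [pvInnerA, h1, h2, hs2]
      | none => simp [pvInnerA, h1, h2, hs2]
    · simp only [Bool.not_eq_true] at h2
      simp [pvInnerA, h1, h2]

-- the core equality, on abstract feature_lower / value_lower / prompt_text
theorem pv_main (fl vl pt : String) :
    (match (if PySem.Str.isIn fl (PySem.Str.lower pt) then pvScanA fl pt else none) with
     | some s => (true, some s)
     | none =>
       match (if PySem.Str.isIn vl (PySem.Str.lower pt) then pvScanA vl pt else none) with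
       | some s => (true, some s)
       | none =>
         match pvEquivA vl (PySem.Str.lower pt) pt pvEquivalents with
         | some s => (true, some s)
         | none => ((false : Bool), (none : Option String)))
      = (match pvSMLoop
            (([fl, vl] ++ pvEquivalents.foldl
                (fun acc (kv : String × List String) => if PySem.Str.isIn kv.1 vl then acc ++ kv.2 else acc)
                []).filter (fun t => PySem.Str.isIn t (PySem.Str.lower pt)))
            ((PySem.Str.split? pt ".").getD [])
            ((([fl, vl] ++ pvEquivalents.foldl
                (fun acc (kv : String × List String) => if PySem.Str.isIn kv.1 vl then acc ++ kv.2 else acc)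
                []).filter (fun t => PySem.Str.isIn t (PySem.Str.lower pt))).length, none) with
         | (_, some s) => (true, some s)
         | (_, none) => ((false : Bool), (none : Option String))) := by
  have h := pvA_chain fl vl pt
  rw [pvInnerA_filter] at h
  have hL : (match (if PySem.Str.isIn fl (PySem.Str.lower pt) then pvScanA fl pt else none) with
     | some s => ((true : Bool), some s)
     | none =>
       match (if PySem.Str.isIn vl (PySem.Str.lower pt) then pvScanA vl pt else none) with
       | some s => (true, some s)
       | none =>
         match pvEquivA vl (PySem.Str.lower pt) pt pvEquivalents with
         | some s => (true, some s)
         | none => ((false : Bool), (none : Option String)))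
      = match (match (if PySem.Str.isIn fl (PySem.Str.lower pt) then pvScanA fl pt else none) with
          | some s => some s
          | none =>
            match (if PySem.Str.isIn vl (PySem.Str.lower pt) then pvScanA vl pt else none) with
            | some s => some s
            | none => pvEquivA vl (PySem.Str.lower pt) pt pvEquivalents) with
        | some s => ((true : Bool), some s)
        | none => ((false : Bool), (none : Option String)) := by
    cases (if PySem.Str.isIn fl (PySem.Str.lower pt) then pvScanA fl pt else none) with
    | some s => rfl
    | none =>
      cases (if PySem.Str.isIn vl (PySem.Str.lower pt) then pvScanA vl pt else none) with
      | some s => rfl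
      | none => cases pvEquivA vl (PySem.Str.lower pt) pt pvEquivalents <;> rfl
  rw [hL, ← h, pvSMLoop_eq_pvTMB]
  have hs := pvTMB_slack pt
    (([fl, vl] ++ pvEquivalents.foldl
        (fun acc (kv : String × List String) => if PySem.Str.isIn kv.1 vl then acc ++ kv.2 else acc)
        []).filter (fun t => PySem.Str.isIn t (PySem.Str.lower pt))) 0
    ((([fl, vl] ++ pvEquivalents.foldl
        (fun acc (kv : String × List String) => if PySem.Str.isIn kv.1 vl then acc ++ kv.2 else acc)
        []).filter (fun t => PySem.Str.isIn t (PySem.Str.lower pt))).length) (by omega)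
  cases htmb : pvTMB ((PySem.Str.split? pt ".").getD [])
      (([fl, vl] ++ pvEquivalents.foldl
          (fun acc (kv : String × List String) => if PySem.Str.isIn kv.1 vl then acc ++ kv.2 else acc)
          []).filter (fun t => PySem.Str.isIn t (PySem.Str.lower pt))) 0 _ with
  | some p =>
    obtain ⟨r, s⟩ := p
    rw [htmb] at hs
    simp only [Option.map_some] at hs
    rw [← hs]
  | none =>
    rw [htmb] at hs
    simp only [Option.map_none] at hs
    rw [← hs]

-- ===== VERDICT (by name: the statement is the Claim_ definition above) =====
theorem check_feature_in_prompt_py_spec : Claim_equal_check_feature_in_prompt_py := by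
  intro feature_name expected_value prompt_text _
  show check_feature_in_prompt_py feature_name expected_value prompt_text
      = check_feature_in_prompt_py_alt feature_name expected_value prompt_text
  exact pv_main (PySem.Str.replace (PySem.Str.lower feature_name) "_" " ")
    (PySem.Str.lower expected_value) prompt_text
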